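-- pv_equiv track=rewrite | github.com/leesan70/algo | leetcode/2020_nov_challenge/week3/code/numbers_at_most_n_given_digit_set.py | atMostNGivenDigitSet
-- ===== SOURCE A (Python) =====
-- from typing import List
--
-- def atMostNGivenDigitSet(digits: List[str], n: int) -> int:
--     n_str = str(n)
--     len_n = len(n_str)
--     # dp[i] = total number of valid integers for N[i:]
--     dp = [0] * len_n + [1]
--     for i in range(len_n - 1, -1, -1):
--         for digit in digits:
--             if digit < n_str[i]:
--                 dp[i] += len(digits) ** (len_n - i - 1)
--             elif digit == n_str[i]:
--                 dp[i] += dp[i + 1]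
--     prev_sum = sum(len(digits) ** i for i in range(1, len_n))
--     return dp[0] + prev_sum
-- ===== SOURCE B (Python) =====
-- from typing import List
--
-- def atMostNGivenDigitSet(digits: List[str], n: int) -> int:
--     s = str(n)
--     L = len(s)
--     D = len(digits)
--     # powers of D: pows[k] = D**k, built once
--     pows = [1]
--     for _ in range(L - 1):
--         pows.append(pows[-1] * D)
--     ans = sum(pows) - 1  # numbers shorter than s: D + D**2 + ... + D**(L-1)
--     mult = 1             # product of per-position equal-counts on the tight prefix
--     for c, pw in zip(s, reversed(pows)):
--         less = 0
--         eq = 0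
--         for d in digits:
--             if d < c:
--                 less += 1
--             elif d == c:
--                 eq += 1
--         ans += mult * less * pw
--         mult *= eq
--     return ans + mult
-- ===== Notes on version B (the rewrite author's own statement) =====
-- stated objective: faster
-- what changed: Replaces A's backward dp array updated in place (with a fresh len(digits)**k exponentiation inside the per-digit inner loop) by a single forward tight-prefix scan over a precomputed power table, accumulating (ans, mult) in one pass.
import Mathlib
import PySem

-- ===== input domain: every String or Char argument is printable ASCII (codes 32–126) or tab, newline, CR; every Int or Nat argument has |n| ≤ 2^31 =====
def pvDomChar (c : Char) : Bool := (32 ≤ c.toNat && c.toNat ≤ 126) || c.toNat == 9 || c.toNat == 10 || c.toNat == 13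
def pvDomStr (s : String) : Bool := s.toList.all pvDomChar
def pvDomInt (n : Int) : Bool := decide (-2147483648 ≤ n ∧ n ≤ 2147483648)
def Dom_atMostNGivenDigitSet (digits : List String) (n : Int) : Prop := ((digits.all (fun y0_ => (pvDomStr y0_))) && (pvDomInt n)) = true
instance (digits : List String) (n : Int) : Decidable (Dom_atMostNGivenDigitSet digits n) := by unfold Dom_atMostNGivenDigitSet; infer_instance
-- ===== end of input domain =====

-- B replaces A's backward dp array (with a per-digit exponentiation in the inner loop) by a single
-- forward tight-prefix scan over a precomputed power table; measured objective: faster (constant factor).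


-- ===== PORT A =====
-- body of A's inner 'for digit in digits' loop, at outer index i (reads n_str[i], dp[i], dp[i+1])
def aInner (digits : List String) (nStr : List Char) (lenN : Int) (dp : List Int) (i : Int) : List Int :=
  digits.foldl (fun dp digit =>
    if PySem.Chars.strLt digit.toList [PySem.List.pyGetD nStr i ' '] then
      PySem.List.pySetD dp i (PySem.List.pyGetD dp i 0 + (digits.length : Int) ^ (lenN - i - 1).toNat)
    else if digit.toList = [PySem.List.pyGetD nStr i ' '] then
      PySem.List.pySetD dp i (PySem.List.pyGetD dp i 0 + PySem.List.pyGetD dp (i + 1) 0)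
    else dp) dp

def atMostNGivenDigitSet (digits : List String) (n : Int) : Int :=
  let nStr := (PySem.Int.toStr n).toList
  let lenN : Int := nStr.length
  let dp0 : List Int := List.replicate nStr.length 0 ++ [1]
  let dp := (PySem.List.pyRange (lenN - 1) (-1) (-1)).foldl (aInner digits nStr lenN) dp0
  let prevSum := ((PySem.List.pyRange 1 lenN 1).map (fun i => (digits.length : Int) ^ i.toNat)).sum
  PySem.List.pyGetD dp 0 0 + prevSum

-- ===== PORT B =====
-- B's inner 'for d in digits' loop: one pass counting (less, eq) for the character c
def bCount (digits : List String) (c : Char) : Int × Int :=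
  digits.foldl (fun le d =>
    if PySem.Chars.strLt d.toList [c] then (le.1 + 1, le.2)
    else if d.toList = [c] then (le.1, le.2 + 1)
    else le) (0, 0)

-- B's forward scan step over one (character, power) pair, state (ans, mult)
def bStep (digits : List String) (am : Int × Int) (cp : Char × Int) : Int × Int :=
  let le := bCount digits cp.1
  (am.1 + am.2 * le.1 * cp.2, am.2 * le.2)

def atMostNGivenDigitSet_alt (digits : List String) (n : Int) : Int :=
  let s := (PySem.Int.toStr n).toList
  let L : Int := s.length
  let D : Int := digits.length
  let pows := (PySem.List.pyRange 0 (L - 1) 1).foldl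
    (fun ps _ => ps ++ [PySem.List.pyGetD ps (-1) 0 * D]) [1]
  let ans := pows.sum - 1
  let res := (s.zip pows.reverse).foldl (bStep digits) (ans, 1)
  res.1 + res.2

-- ===== PRECONDITION & SPEC =====
def Spec_atMostNGivenDigitSet (digits : List String) (n : Int) (out : Int) : Prop := out = atMostNGivenDigitSet_alt digits n
instance (digits : List String) (n : Int) (out : Int) : Decidable (Spec_atMostNGivenDigitSet digits n out) := by unfold Spec_atMostNGivenDigitSet; infer_instance

-- ===== CLAIM (what is proved, stated in full; the proofs are below) =====
def Claim_equal_atMostNGivenDigitSet : Prop := ∀ (digits : List String) (n : Int), Dom_atMostNGivenDigitSet digits n → Spec_atMostNGivenDigitSet digits n (atMostNGivenDigitSet digits n)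

-- ===== LEMMAS AND PROOFS =====

-- count of digits strictly below c / equal to c (the elif branch), as Ints
def pvLess (digits : List String) (c : Char) : Int :=
  (digits.countP (fun d => PySem.Chars.strLt d.toList [c]) : Int)
def pvEq (digits : List String) (c : Char) : Int :=
  (digits.countP (fun d => !PySem.Chars.strLt d.toList [c] && decide (d.toList = [c])) : Int)

-- the common mathematical value: number of valid strings ≤ t (tight part), dp[i] of A
def pvG (digits : List String) : List Char → Int
  | [] => 1
  | c :: t => pvLess digits c * (digits.length : Int) ^ t.length + pvEq digits c * pvG digits t

theorem bCount_go (c : Char) (digits : List String) : ∀ (l e : Int),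
    digits.foldl (fun le d =>
      if PySem.Chars.strLt d.toList [c] then (le.1 + 1, le.2)
      else if d.toList = [c] then (le.1, le.2 + 1)
      else le) (l, e) = (l + pvLess digits c, e + pvEq digits c) := by
  induction digits with
  | nil => intro l e; simp [pvLess, pvEq]
  | cons d rest ih =>
    intro l e
    simp only [List.foldl_cons]
    by_cases h1 : PySem.Chars.strLt d.toList [c]
    · simp only [h1, if_true, ih]
      simp [pvLess, pvEq, h1]
      ring
    · by_cases h2 : d.toList = [c]
      · have hsl : PySem.Chars.strLt d.toList [c] = false := by simpa using h1
        have hsl' : PySem.Chars.strLt [c] [c] = false := h2 ▸ hsl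
        simp only [h1, h2, if_false, if_true, ih]
        simp [pvLess, pvEq, List.countP_cons, h1, h2, hsl, hsl']
        push_cast; ring
      · simp only [h1, h2, if_false, ih]
        simp [pvLess, pvEq, h1, h2]

theorem bCount_eq (digits : List String) (c : Char) :
    bCount digits c = (pvLess digits c, pvEq digits c) := by
  have := bCount_go c digits 0 0
  simpa [bCount] using this

theorem bLoop_eq (digits : List String) (t : List Char) (a m : Int) :
    (((t.zip (((List.range t.length).map (fun k => (digits.length : Int) ^ k)).reverse)).foldl
        (bStep digits) (a, m)).1 +
      ((t.zip (((List.range t.length).map (fun k => (digits.length : Int) ^ k)).reverse)).foldl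
        (bStep digits) (a, m)).2) = a + m * pvG digits t := by
  induction t generalizing a m with
  | nil => simp [pvG]
  | cons c rest ih =>
    simp only [List.length_cons, List.range_succ, List.map_append, List.reverse_append,
      List.map_cons, List.map_nil, List.reverse_cons, List.reverse_nil, List.nil_append,
      List.cons_append, List.zip_cons_cons, List.foldl_cons]
    simp only [bStep, bCount_eq]
    rw [ih]
    simp only [pvG]
    ring

theorem pows_eq (digits : List String) (m : Nat) :
    (PySem.List.pyRange 0 (m : Int) 1).foldl
        (fun ps _ => ps ++ [PySem.List.pyGetD ps (-1) 0 * (digits.length : Int)]) [1] =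
      (List.range (m + 1)).map (fun k => (digits.length : Int) ^ k) := by
  induction m with
  | zero => simp [PySem.List.pyRange_one_eq_nil]
  | succ m ih =>
    have hcast : ((m + 1 : Nat) : Int) = (m : Int) + 1 := by push_cast; ring
    rw [hcast, PySem.List.pyRange_one_succ_right (by positivity), List.foldl_append, ih]
    simp only [List.foldl_cons, List.foldl_nil]
    rw [show (List.range (m + 1)).map (fun k => (digits.length : Int) ^ k)
        = (List.range m).map (fun k => (digits.length : Int) ^ k) ++ [(digits.length : Int) ^ m] by
      simp [List.range_succ]]
    rw [PySem.List.pyGetD_neg_one_append_singleton]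
    simp [List.range_succ, pow_succ]

theorem prevSum_eq (digits : List String) (L : Nat) (hL : 1 ≤ L) :
    ((PySem.List.pyRange 1 (L : Int) 1).map (fun i => (digits.length : Int) ^ i.toNat)).sum =
      ((List.range L).map (fun k => (digits.length : Int) ^ k)).sum - 1 := by
  induction L with
  | zero => omega
  | succ m ih =>
    rcases Nat.eq_zero_or_pos m with hm | hm
    · subst hm
      simp [PySem.List.pyRange_one_eq_nil]
    · have hcast : ((m + 1 : Nat) : Int) = (m : Int) + 1 := by push_cast; ring
      rw [hcast, PySem.List.pyRange_one_succ_right (by exact_mod_cast hm), List.map_append,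
        List.sum_append, ih hm, List.range_succ, List.map_append, List.sum_append]
      simp
      ring

theorem aInner_eq (digits : List String) (nStr : List Char) (lenN : Int) (k : Nat)
    (dp : List Int) (hk : k + 1 < dp.length) :
    aInner digits nStr lenN dp (k : Int) =
      dp.set k (dp.getD k 0 + pvLess digits (nStr.getD k ' ') * (digits.length : Int) ^ (lenN - k - 1).toNat
        + pvEq digits (nStr.getD k ' ') * dp.getD (k + 1) 0) := by
  have go : ∀ (ds : List String) (c : Char) (P : Int) (dp : List Int), k + 1 < dp.length →
      ds.foldl (fun dp d =>
        if PySem.Chars.strLt d.toList [c] then dp.set k (dp.getD k 0 + P)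
        else if d.toList = [c] then dp.set k (dp.getD k 0 + dp.getD (k + 1) 0)
        else dp) dp
      = dp.set k (dp.getD k 0 + pvLess ds c * P + pvEq ds c * dp.getD (k + 1) 0) := by
    intro ds c P
    induction ds with
    | nil =>
      intro dp hdp
      simp [pvLess, pvEq]
      rw [List.getElem?_eq_getElem (by omega : k < dp.length)]
      exact (List.set_getElem_self ..).symm
    | cons d rest ih =>
      intro dp hdp
      simp only [List.foldl_cons]
      by_cases h1 : PySem.Chars.strLt d.toList [c]
      · rw [if_pos h1, ih _ (by simpa using hdp)]
        rw [List.set_set]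
        have e1 : (dp.set k (dp.getD k 0 + P)).getD k 0 = dp.getD k 0 + P := by
          simp [List.getD_eq_getElem?_getD, (by omega : k < dp.length)]
        have e2 : (dp.set k (dp.getD k 0 + P)).getD (k + 1) 0 = dp.getD (k + 1) 0 := by
          simp [List.getD_eq_getElem?_getD, List.getElem?_set_ne]
        rw [e1, e2]
        congr 1
        simp only [pvLess, pvEq, List.countP_cons, h1]
        have hne : (!PySem.Chars.strLt d.toList [c] && decide (d.toList = [c])) = false := by
          simp [h1]
        simp [hne]
        push_cast; ring
      · by_cases h2 : d.toList = [c]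
        · rw [if_neg h1, if_pos h2, ih _ (by simpa using hdp)]
          rw [List.set_set]
          have e1 : (dp.set k (dp.getD k 0 + dp.getD (k + 1) 0)).getD k 0
              = dp.getD k 0 + dp.getD (k + 1) 0 := by
            simp [List.getD_eq_getElem?_getD, (by omega : k < dp.length)]
          have e2 : (dp.set k (dp.getD k 0 + dp.getD (k + 1) 0)).getD (k + 1) 0
              = dp.getD (k + 1) 0 := by
            simp [List.getD_eq_getElem?_getD, List.getElem?_set_ne]
          rw [e1, e2]
          congr 1
          have hsl : PySem.Chars.strLt d.toList [c] = false := by simpa using h1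
          have hsl' : PySem.Chars.strLt [c] [c] = false := h2 ▸ hsl
          simp only [pvLess, pvEq, List.countP_cons, hsl, h2, hsl']
          simp
          push_cast; ring
        · rw [if_neg h1, if_neg h2, ih _ hdp]
          congr 1
          have hsl : PySem.Chars.strLt d.toList [c] = false := by simpa using h1
          simp [pvLess, pvEq, List.countP_cons, hsl, h2]
  have hcast : (k : Int) + 1 = ((k + 1 : Nat) : Int) := by push_cast; ring
  unfold aInner
  simp only [hcast, PySem.List.pySetD_natCast, PySem.List.pyGetD_natCast]
  exact go digits (nStr.getD k ' ') _ dp hk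

theorem aLoop_eq (digits : List String) (s : List Char) : ∀ (k : Nat), k ≤ s.length →
    (PySem.List.pyRange ((k : Int) - 1) (-1) (-1)).foldl
        (aInner digits s (s.length : Int))
        (List.replicate k 0 ++ ((s.drop k).tails.map (pvG digits))) =
      s.tails.map (pvG digits) := by
  intro k
  induction k with
  | zero =>
    intro _
    simp [PySem.List.pyRange_neg_one_eq_nil (by norm_num : (0 : Int) - 1 ≤ -1)]
  | succ k ih =>
    intro hk
    have hkL : k < s.length := by omega
    have hc1 : ((k + 1 : Nat) : Int) - 1 = (k : Int) := by push_cast; ring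
    rw [hc1, PySem.List.pyRange_neg_one_cons (by omega), List.foldl_cons]
    have hT : ((s.drop (k + 1)).tails.map (pvG digits)).length = s.length - k := by
      simp [List.length_tails]
      omega
    have hlen : k + 1 < (List.replicate (k + 1) (0 : Int) ++ ((s.drop (k + 1)).tails.map (pvG digits))).length := by
      simp [hT]
      omega
    rw [aInner_eq digits s (s.length : Int) k _ hlen]
    have e0 : (List.replicate (k + 1) (0 : Int) ++ ((s.drop (k + 1)).tails.map (pvG digits))).getD k 0 = 0 := by
      rw [List.getD_eq_getElem?_getD,
        List.getElem?_append_left (by simp : k < (List.replicate (k + 1) (0 : Int)).length)]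
      simp
    have e1 : (List.replicate (k + 1) (0 : Int) ++ ((s.drop (k + 1)).tails.map (pvG digits))).getD (k + 1) 0
        = pvG digits (s.drop (k + 1)) := by
      rw [List.getD_eq_getElem?_getD, List.getElem?_append_right (by simp)]
      simp only [List.length_replicate, Nat.sub_self]
      cases hd : s.drop (k + 1) with
      | nil => simp [hd, List.tails]
      | cons a t => simp [List.tails]
    rw [e0, e1]
    have hset : (List.replicate (k + 1) (0 : Int) ++ ((s.drop (k + 1)).tails.map (pvG digits))).set k
          (0 + pvLess digits (s.getD k ' ') * (digits.length : Int) ^ ((s.length : Int) - k - 1).toNat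
            + pvEq digits (s.getD k ' ') * pvG digits (s.drop (k + 1)))
        = List.replicate k 0 ++ ((s.drop k).tails.map (pvG digits)) := by
      rw [List.replicate_succ', List.append_assoc, List.set_append]
      rw [if_neg (by simp)]
      simp only [List.length_replicate, Nat.sub_self, List.singleton_append, List.set_cons_zero]
      have hdrop : s.drop k = s[k] :: s.drop (k + 1) := List.drop_eq_getElem_cons hkL
      rw [hdrop, List.tails_cons, List.map_cons]
      congr 1
      congr 1
      have hgetD : s.getD k ' ' = s[k] := List.getD_eq_getElem s ' ' hkL
      have hexp : ((s.length : Int) - k - 1).toNat = (s.drop (k + 1)).length := by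
        simp [List.length_drop]; omega
      simp only [pvG, hgetD, hexp]
      ring
    rw [hset]
    exact ih (by omega)

theorem main_eq (digits : List String) (s : List Char) (hs : s ≠ []) :
    PySem.List.pyGetD
        ((PySem.List.pyRange ((s.length : Int) - 1) (-1) (-1)).foldl
          (aInner digits s (s.length : Int)) (List.replicate s.length 0 ++ [1])) 0 0
      + ((PySem.List.pyRange 1 (s.length : Int) 1).map (fun i => (digits.length : Int) ^ i.toNat)).sum
    = (((s.zip (((PySem.List.pyRange 0 ((s.length : Int) - 1) 1).foldl
            (fun ps _ => ps ++ [PySem.List.pyGetD ps (-1) 0 * (digits.length : Int)]) [1]).reverse)).foldl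
          (bStep digits)
          (((PySem.List.pyRange 0 ((s.length : Int) - 1) 1).foldl
            (fun ps _ => ps ++ [PySem.List.pyGetD ps (-1) 0 * (digits.length : Int)]) [1]).sum - 1, 1)).1
        + ((s.zip (((PySem.List.pyRange 0 ((s.length : Int) - 1) 1).foldl
            (fun ps _ => ps ++ [PySem.List.pyGetD ps (-1) 0 * (digits.length : Int)]) [1]).reverse)).foldl
          (bStep digits)
          (((PySem.List.pyRange 0 ((s.length : Int) - 1) 1).foldl
            (fun ps _ => ps ++ [PySem.List.pyGetD ps (-1) 0 * (digits.length : Int)]) [1]).sum - 1, 1)).2) := by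
  obtain ⟨m, hm⟩ : ∃ m, s.length = m + 1 := by
    cases s with
    | nil => exact absurd rfl hs
    | cons c t => exact ⟨t.length, rfl⟩
  -- A side: the backward dp loop computes the tails of pvG
  have hA := aLoop_eq digits s s.length (le_refl _)
  rw [List.drop_length] at hA
  have htails1 : (([] : List Char).tails.map (pvG digits)) = [1] := by simp [pvG]
  rw [htails1] at hA
  rw [hA]
  have hhead : PySem.List.pyGetD (s.tails.map (pvG digits)) 0 0 = pvG digits s := by
    cases s with
    | nil => exact absurd rfl hs
    | cons c t => simp [List.tails_cons, PySem.List.pyGetD_zero_cons]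
  rw [hhead, prevSum_eq digits s.length (by omega)]
  -- B side: power table then forward scan
  have hc : (s.length : Int) - 1 = ((m : Nat) : Int) := by rw [hm]; push_cast; ring
  rw [hc, pows_eq digits m, show m + 1 = s.length from hm.symm]
  rw [bLoop_eq digits s _ 1]
  ring

-- ===== VERDICT (by name: the statement is the Claim_ definition above) =====
theorem atMostNGivenDigitSet_spec : Claim_equal_atMostNGivenDigitSet := by
  intro digits n _
  unfold Spec_atMostNGivenDigitSet
  cases h : (PySem.Int.toStr n).toList with
  | nil =>
    simp [atMostNGivenDigitSet, atMostNGivenDigitSet_alt, h,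
      PySem.List.pyRange_one_eq_nil (by norm_num : (0 : Int) ≤ 1)]
  | cons c t =>
    simp only [atMostNGivenDigitSet, atMostNGivenDigitSet_alt, h]
    exact main_eq digits (c :: t) (by simp)
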